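-- pv_equiv track=rewrite | github.com/knae11/pythonAlgorithm | src/kakao/프렌즈4블록.py | remove_items
-- ===== SOURCE A (Python) =====
-- from collections import deque
--
-- def remove_items(process_board, m, n):
--     new_board = [[] for _ in range(m)]
--     count = 0
--     for column in range(n):
--         line = [process_board[row][column] for row in range(m)]
--         new_line = deque([])
--         for item in line:
--             if item == "#":
--                 count += 1
--             else:
--                 new_line.append(item)
--         while len(new_line) < m:
--             new_line.appendleft("0")
--         for i in range(m):
--             new_board[i].append(new_line[i])
--     return new_board, count
-- ===== SOURCE B (Python) =====
-- def remove_items(process_board, m, n):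
--     new_board = [["0"] * n for _ in range(m)]
--     write = [m - 1] * n
--     count = 0
--     for row in range(m - 1, -1, -1):
--         for c in range(n):
--             item = process_board[row][c]
--             if item == "#":
--                 count += 1
--             else:
--                 new_board[write[c]][c] = item
--                 write[c] -= 1
--     return new_board, count
-- ===== Notes on version B (the rewrite author's own statement) =====
-- stated objective: alternative
-- what changed: B pre-fills an m-by-n grid of '0', then makes a single bottom-up row-major pass over the board with one write pointer per column: non-'#' cells are scattered in place at write[c] (which then decrements) and '#' cells are only counted, instead of A's column-major extraction, deque appendleft-padding and per-row append.
import Mathlib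
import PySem

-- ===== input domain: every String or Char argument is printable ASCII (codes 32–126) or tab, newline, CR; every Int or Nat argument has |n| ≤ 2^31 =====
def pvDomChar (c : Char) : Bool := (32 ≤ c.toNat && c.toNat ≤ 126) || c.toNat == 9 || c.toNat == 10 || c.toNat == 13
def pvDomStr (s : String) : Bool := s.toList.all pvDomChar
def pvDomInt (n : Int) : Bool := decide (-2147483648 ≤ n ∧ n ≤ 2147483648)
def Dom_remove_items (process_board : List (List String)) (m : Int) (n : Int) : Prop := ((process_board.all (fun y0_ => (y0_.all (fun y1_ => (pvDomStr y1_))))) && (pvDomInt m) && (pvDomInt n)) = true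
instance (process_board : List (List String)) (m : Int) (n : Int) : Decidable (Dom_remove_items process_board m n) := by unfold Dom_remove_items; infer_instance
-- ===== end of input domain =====

-- B replaces A's column-major extract/pad/append passes by one bottom-up row-major pass that
-- scatters non-'#' cells in place through per-column write pointers into a pre-filled '0' grid;
-- objective: alternative algorithm, same cost.

-- ===== PORT A =====
-- the 'while len(new_line) < m: new_line.appendleft("0")' loop
def padLeft (m : Int) (l : List String) : List String :=
  if (l.length : Int) < m then padLeft m ("0" :: l) else l
termination_by (m - l.length).toNat
decreasing_by simp only [List.length_cons]; omega

def remove_items (process_board : List (List String)) (m : Int) (n : Int) : List (List String) × Int :=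
  (PySem.List.pyRange 0 n 1).foldl (fun st column =>
      let line := (PySem.List.pyRange 0 m 1).map
        (fun row => PySem.List.pyGetD (PySem.List.pyGetD process_board row []) column "")
      let p := line.foldl (fun (q : List String × Int) item =>
          if item == "#" then (q.1, q.2 + 1) else (q.1 ++ [item], q.2)) ([], st.2)
      let new_line := padLeft m p.1
      let nb := (PySem.List.pyRange 0 m 1).foldl (fun acc i =>
          PySem.List.pySetD acc i (PySem.List.pyGetD acc i [] ++ [PySem.List.pyGetD new_line i ""])) st.1
      (nb, p.2))
    ((PySem.List.pyRange 0 m 1).map (fun _ => ([] : List String)), 0)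

-- ===== PORT B =====
-- state: (new_board, write, count); 'for row in range(m-1,-1,-1): for c in range(n): …'
def remove_items_alt (process_board : List (List String)) (m : Int) (n : Int) : List (List String) × Int :=
  let st := (PySem.List.pyRange (m - 1) (-1) (-1)).foldl
    (fun (s : List (List String) × List Int × Int) row =>
      (PySem.List.pyRange 0 n 1).foldl
        (fun (s : List (List String) × List Int × Int) c =>
          let item := PySem.List.pyGetD (PySem.List.pyGetD process_board row []) c ""
          if item == "#" then (s.1, s.2.1, s.2.2 + 1)
          else
            let w := PySem.List.pyGetD s.2.1 c 0
            (PySem.List.pySetD s.1 w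
               (PySem.List.pySetD (PySem.List.pyGetD s.1 w []) c item),
             PySem.List.pySetD s.2.1 c (w - 1), s.2.2)) s)
    ((PySem.List.pyRange 0 m 1).map (fun _ => List.replicate n.toNat "0"),
     List.replicate n.toNat (m - 1), 0)
  (st.1, st.2.2)

-- ===== PRECONDITION & SPEC =====
-- Pre_ excludes exactly the inputs where A raises IndexError: some indexed row or cell is missing
-- (indexing only happens when 0 < m and 0 < n).
def Pre_remove_items (process_board : List (List String)) (m : Int) (n : Int) : Prop :=
  n ≤ 0 ∨ m ≤ 0 ∨ (m ≤ (process_board.length : Int) ∧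
    ∀ row ∈ process_board.take m.toNat, n ≤ (row.length : Int))
instance (process_board : List (List String)) (m : Int) (n : Int) : Decidable (Pre_remove_items process_board m n) := by unfold Pre_remove_items; infer_instance

def pvWitness_remove_items : List (List String) × Int × Int := ([["#", "A"], ["0", "#"]], 2, 2)

def Spec_remove_items (process_board : List (List String)) (m : Int) (n : Int) (out : List (List String) × Int) : Prop := out = remove_items_alt process_board m n
instance (process_board : List (List String)) (m : Int) (n : Int) (out : List (List String) × Int) : Decidable (Spec_remove_items process_board m n out) := by unfold Spec_remove_items; infer_instance

-- ===== CLAIM (what is proved, stated in full; the proofs are below) =====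
def Claim_equal_remove_items : Prop := ∀ (process_board : List (List String)) (m : Int) (n : Int), Dom_remove_items process_board m n → Pre_remove_items process_board m n → Spec_remove_items process_board m n (remove_items process_board m n)

-- ===== LEMMAS AND PROOFS =====

-- the cell list of one column, its kept cells, the rebuilt column, the '#'-count of the column
def colv (pb : List (List String)) (m c : Int) : List String :=
  (PySem.List.pyRange 0 m 1).map (fun row => PySem.List.pyGetD (PySem.List.pyGetD pb row []) c "")
def keptv (pb : List (List String)) (m c : Int) : List String :=
  (colv pb m c).filter (fun x => x != "#")
def newcol (pb : List (List String)) (m c : Int) : List String :=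
  List.replicate (m.toNat - (keptv pb m c).length) "0" ++ keptv pb m c
def hashc (pb : List (List String)) (m c : Int) : Int :=
  ((colv pb m c).length : Int) - ((keptv pb m c).length : Int)
-- row i of the transpose of cols, for i < k
def rowsOf (k : ℕ) (cols : List (List String)) : List (List String) :=
  (List.range k).map (fun i => cols.map (fun c => c.getD i ""))

theorem length_colv (pb : List (List String)) (m c : Int) : (colv pb m c).length = m.toNat := by
  simp [colv, PySem.List.length_pyRange_one]

theorem length_keptv_le (pb : List (List String)) (m c : Int) : (keptv pb m c).length ≤ m.toNat := by
  have h := List.length_filter_le (fun x => x != "#") (colv pb m c)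
  rw [length_colv] at h
  exact h

theorem length_newcol (pb : List (List String)) (m c : Int) : (newcol pb m c).length = m.toNat := by
  have h := length_keptv_le pb m c
  simp [newcol]
  omega

theorem filt_fold (l : List String) : ∀ (acc : List String) (cnt : Int),
    l.foldl (fun (q : List String × Int) item =>
        if item == "#" then (q.1, q.2 + 1) else (q.1 ++ [item], q.2)) (acc, cnt)
    = (acc ++ l.filter (fun x => x != "#"),
       cnt + ((l.length : Int) - ((l.filter (fun x => x != "#")).length : Int))) := by
  induction l with
  | nil => intro acc cnt; simp
  | cons x t ih =>
    intro acc cnt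
    by_cases hx : x = "#"
    · subst hx
      simp only [List.foldl_cons, BEq.rfl, if_true, ih, List.filter_cons, List.length_cons]
      simp only [bne_self_eq_false, Bool.false_eq_true, if_false]
      congr 1
      push_cast; ring
    · have hb : (x == "#") = false := by simp [hx]
      simp only [List.foldl_cons, hb, Bool.false_eq_true, if_false, ih, List.filter_cons,
        List.length_cons, bne, Bool.not_false, if_true]
      congr 1
      · simp
      · push_cast; ring

theorem padLeft_eq (m : Int) (l : List String) :
    padLeft m l = List.replicate (m.toNat - l.length) "0" ++ l := by
  fun_induction padLeft m l with
  | case1 l hlt ih =>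
    rw [ih]
    have h1 : m.toNat - l.length = (m.toNat - (l.length + 1)) + 1 := by omega
    rw [h1, List.replicate_succ']
    simp
  | case2 l hge =>
    have : m.toNat - l.length = 0 := by omega
    simp [this]

theorem scatNat (nl : List String) (nb : List (List String))
    (hlen : nb.length = nl.length) : ∀ (k : ℕ), k ≤ nb.length →
    (List.range k).foldl (fun acc j => acc.set j ((acc.getD j []) ++ [nl.getD j ""])) nb
    = (List.zipWith (fun r v => r ++ [v]) nb nl).take k ++ nb.drop k := by
  intro k
  induction k with
  | zero => intro _; simp
  | succ k ih =>
    intro hk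
    have hk' : k ≤ nb.length := by omega
    have hkn : k < nb.length := by omega
    have hknl : k < nl.length := by omega
    have hzlen : (List.zipWith (fun r v => r ++ [v]) nb nl).length = nb.length := by
      simp [hlen]
    rw [List.range_succ, List.foldl_append, ih hk']
    simp only [List.foldl_cons, List.foldl_nil]
    have hlen_take : ((List.zipWith (fun r v => r ++ [v]) nb nl).take k).length = k := by
      simp [hzlen]; omega
    have hget : (((List.zipWith (fun r v => r ++ [v]) nb nl).take k ++ nb.drop k).getD k []) = nb[k] := by
      rw [List.getD_eq_getElem?_getD, List.getElem?_append_right (by omega), hlen_take]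
      simp [List.getElem?_drop, List.getElem?_eq_getElem hkn]
    have hgetnl : nl.getD k "" = nl[k] := List.getD_eq_getElem nl "" hknl
    rw [hget, hgetnl, List.set_append_right _ _ (by omega), hlen_take]
    have hdrop : nb.drop k = nb[k] :: nb.drop (k+1) := List.drop_eq_getElem_cons hkn
    rw [hdrop]
    simp only [Nat.sub_self, List.set_cons_zero]
    have htake : (List.zipWith (fun r v => r ++ [v]) nb nl).take (k+1)
        = (List.zipWith (fun r v => r ++ [v]) nb nl).take k ++ [(List.zipWith (fun r v => r ++ [v]) nb nl)[k]] := by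
      rw [List.take_add_one, List.getElem?_eq_getElem (by omega)]
      rfl
    rw [htake]
    simp [List.getElem_zipWith]

theorem scatter (nl : List String) (nb : List (List String)) (m : Int)
    (h1 : nb.length = m.toNat) (h2 : nl.length = m.toNat) :
    (PySem.List.pyRange 0 m 1).foldl (fun acc i =>
        PySem.List.pySetD acc i (PySem.List.pyGetD acc i [] ++ [PySem.List.pyGetD nl i ""])) nb
    = List.zipWith (fun r v => r ++ [v]) nb nl := by
  rw [PySem.List.pyRange_one, List.foldl_map]
  simp only [zero_add, PySem.List.pySetD_natCast, PySem.List.pyGetD_natCast, Int.sub_zero]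
  rw [scatNat nl nb (by omega) m.toNat (by omega)]
  have hz : (List.zipWith (fun r v => r ++ [v]) nb nl).length = m.toNat := by simp; omega
  rw [List.take_of_length_le (by omega), List.drop_of_length_le (by omega), List.append_nil]

theorem mainfoldA (pb : List (List String)) (m : Int) (cs : List Int) :
    ∀ (nb : List (List String)) (cnt : Int), nb.length = m.toNat →
    cs.foldl (fun st column =>
      let line := (PySem.List.pyRange 0 m 1).map
        (fun row => PySem.List.pyGetD (PySem.List.pyGetD pb row []) column "")
      let p := line.foldl (fun (q : List String × Int) item =>
          if item == "#" then (q.1, q.2 + 1) else (q.1 ++ [item], q.2)) ([], st.2)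
      let new_line := padLeft m p.1
      let nbd := (PySem.List.pyRange 0 m 1).foldl (fun acc i =>
          PySem.List.pySetD acc i (PySem.List.pyGetD acc i [] ++ [PySem.List.pyGetD new_line i ""])) st.1
      (nbd, p.2)) (nb, cnt)
    = (cs.foldl (fun b c => List.zipWith (fun r v => r ++ [v]) b (newcol pb m c)) nb,
       cnt + (cs.map (hashc pb m)).sum) := by
  induction cs with
  | nil => intro nb cnt h; simp
  | cons c cs ih =>
    intro nb cnt h
    simp only [List.foldl_cons, List.map_cons, List.sum_cons]
    rw [filt_fold]
    simp only [List.nil_append]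
    rw [padLeft_eq]
    have hnc : List.replicate (m.toNat - (((PySem.List.pyRange 0 m 1).map
          (fun row => PySem.List.pyGetD (PySem.List.pyGetD pb row []) c "")).filter
          (fun x => x != "#")).length) "0" ++ ((PySem.List.pyRange 0 m 1).map
          (fun row => PySem.List.pyGetD (PySem.List.pyGetD pb row []) c "")).filter
          (fun x => x != "#") = newcol pb m c := rfl
    rw [hnc]
    rw [scatter (newcol pb m c) nb m h (length_newcol pb m c)]
    rw [ih _ _ (by rw [List.length_zipWith, h, length_newcol pb m c, min_self])]
    congr 1
    have : hashc pb m c = ((colv pb m c).length : Int) - ((keptv pb m c).length : Int) := rfl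
    rw [this]
    show cnt + (↑(colv pb m c).length - ↑(keptv pb m c).length) + (cs.map (hashc pb m)).sum
        = cnt + (↑(colv pb m c).length - ↑(keptv pb m c).length + (cs.map (hashc pb m)).sum)
    ring

theorem foldZip_eq_rowsOf (k : ℕ) (cols : List (List String)) (h : ∀ c ∈ cols, c.length = k) :
    cols.foldl (fun b c => List.zipWith (fun r v => r ++ [v]) b c) (List.replicate k ([] : List String))
    = rowsOf k cols := by
  induction cols using List.reverseRecOn with
  | nil =>
    apply List.ext_getElem
    · simp [rowsOf]
    · intro i h1 h2
      simp [rowsOf]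
  | append_singleton cols c ih =>
    have hc : c.length = k := h c (by simp)
    have h' : ∀ d ∈ cols, d.length = k := fun d hd => h d (by simp [hd])
    rw [List.foldl_append, ih h']
    simp only [List.foldl_cons, List.foldl_nil]
    apply List.ext_getElem
    · simp [rowsOf, hc]
    · intro i h1 h2
      have hik : i < k := by simpa [rowsOf, hc] using h2
      simp only [rowsOf, List.getElem_zipWith, List.getElem_map, List.getElem_range, List.map_append,
        List.map_cons, List.map_nil]
      rw [List.getD_eq_getElem c "" (show i < c.length by omega)]

-- ============ B-side invariant machinery ============

-- kept cells of column c among rows ≥ r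
def tailv (pb : List (List String)) (m : Int) (c r : ℕ) : List String :=
  ((colv pb m c).drop r).filter (fun x => x != "#")
-- a column padded to height M with '0' on top
def padT (M : ℕ) (t : List String) : List String :=
  List.replicate (M - t.length) "0" ++ t
-- the functional grid / write list determined by a family of kept-tails
def gridOf (M N : ℕ) (t : ℕ → List String) : List (List String) :=
  (List.range M).map (fun i => (List.range N).map (fun c => (padT M (t c)).getD i ""))
def writeOf (m : Int) (N : ℕ) (t : ℕ → List String) : List Int :=
  (List.range N).map (fun c => m - 1 - ((t c).length : Int))
-- the invariant state after all rows ≥ r have been processed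
def BS (pb : List (List String)) (m n : Int) (r : ℕ) : List (List String) × List Int × Int :=
  (gridOf m.toNat n.toNat (fun c => tailv pb m c r),
   writeOf m n.toNat (fun c => tailv pb m c r),
   ((List.range n.toNat).map
      (fun c => (m.toNat : Int) - r - ((tailv pb m c r).length : Int))).sum)
-- B's cell step, with the row fixed
def cellF (pb : List (List String)) (row : Int)
    (s : List (List String) × List Int × Int) (c : Int) :
    List (List String) × List Int × Int :=
  let item := PySem.List.pyGetD (PySem.List.pyGetD pb row []) c ""
  if item == "#" then (s.1, s.2.1, s.2.2 + 1)
  else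
    let w := PySem.List.pyGetD s.2.1 c 0
    (PySem.List.pySetD s.1 w
       (PySem.List.pySetD (PySem.List.pyGetD s.1 w []) c item),
     PySem.List.pySetD s.2.1 c (w - 1), s.2.2)
-- mixed tail family while row r is half processed (columns < j already done)
def tmix (pb : List (List String)) (m : Int) (r j c : ℕ) : List String :=
  if c < j then tailv pb m c r else tailv pb m c (r + 1)
-- 1 iff cell (r, c) is '#'
def hAt (pb : List (List String)) (m : Int) (r c : ℕ) : Int :=
  if ((colv pb m c).getD r "" == "#") = true then 1 else 0

theorem length_tailv_le (pb : List (List String)) (m : Int) (c r : ℕ) :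
    (tailv pb m c r).length ≤ m.toNat - r := by
  have h := List.length_filter_le (fun x => x != "#") ((colv pb m c).drop r)
  simpa [length_colv] using h

theorem getD_padT (M : ℕ) (t : List String) (i : ℕ) :
    (padT M t).getD i "" = if i < M - t.length then "0" else t.getD (i - (M - t.length)) "" := by
  unfold padT
  rcases Nat.lt_or_ge i (M - t.length) with h | h
  · rw [if_pos h, List.getD_eq_getElem?_getD, List.getElem?_append_left (by simpa using h)]
    simp [h]
  · rw [if_neg (by omega), List.getD_eq_getElem?_getD,
      List.getElem?_append_right (by simpa using h)]
    simp [List.getD_eq_getElem?_getD]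

theorem padT_cons (M : ℕ) (t : List String) (x : String) (h : t.length < M) (i : ℕ) :
    (padT M (x :: t)).getD i "" = if i = M - t.length - 1 then x else (padT M t).getD i "" := by
  rw [getD_padT, getD_padT]
  simp only [List.length_cons]
  by_cases h1 : i < M - (t.length + 1)
  · rw [if_pos h1, if_neg (by omega), if_pos (by omega)]
  · rw [if_neg h1]
    by_cases h2 : i = M - t.length - 1
    · rw [if_pos h2]
      have h0 : i - (M - (t.length + 1)) = 0 := by omega
      simp [h0]
    · rw [if_neg h2, if_neg (by omega)]
      have h3 : i - (M - (t.length + 1)) = (i - (M - t.length)) + 1 := by omega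
      rw [h3]
      simp

theorem set_map_range {α : Type} (N j : ℕ) (f : ℕ → α) (v : α) :
    ((List.range N).map f).set j v
    = (List.range N).map (fun c => if c = j then v else f c) := by
  apply List.ext_getElem
  · simp
  · intro i h1 h2
    simp only [List.getElem_set, List.getElem_map, List.getElem_range]
    by_cases hij : i = j
    · subst hij; simp
    · rw [if_neg (fun h : j = i => hij h.symm), if_neg hij]

theorem gridOf_congr (M N : ℕ) (t t' : ℕ → List String) (h : ∀ c, c < N → t c = t' c) :
    gridOf M N t = gridOf M N t' := by
  unfold gridOf
  apply List.map_congr_left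
  intro i _
  apply List.map_congr_left
  intro c hc
  rw [h c (by simpa using hc)]

theorem writeOf_congr (m : Int) (N : ℕ) (t t' : ℕ → List String) (h : ∀ c, c < N → t c = t' c) :
    writeOf m N t = writeOf m N t' := by
  unfold writeOf
  apply List.map_congr_left
  intro c hc
  rw [h c (by simpa using hc)]

-- the grid after one in-place write at row (M - 1 - |t j|), column j
theorem grid_write (M N : ℕ) (t : ℕ → List String) (j : ℕ) (hj : j < N)
    (x : String) (hlen : (t j).length < M) :
    (gridOf M N t).set (M - 1 - (t j).length)
      (((gridOf M N t).getD (M - 1 - (t j).length) []).set j x)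
    = gridOf M N (fun c => if c = j then x :: t j else t c) := by
  have hW : (M - 1 - (t j).length) < M := by omega
  rw [List.getD_eq_getElem _ _ (by simpa [gridOf] using hW)]
  apply List.ext_getElem
  · simp [gridOf]
  · intro i h1 h2
    simp only [gridOf, List.getElem_set, List.getElem_map, List.getElem_range]
    by_cases hiW : M - 1 - (t j).length = i
    · subst hiW
      rw [if_pos rfl, set_map_range]
      apply List.map_congr_left
      intro c _
      by_cases hcj : c = j
      · subst hcj
        rw [if_pos rfl, if_pos rfl, padT_cons M (t c) x hlen, if_pos (by omega)]
      · rw [if_neg hcj, if_neg hcj]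
    · rw [if_neg hiW]
      apply List.map_congr_left
      intro c _
      by_cases hcj : c = j
      · subst hcj
        rw [if_pos rfl, padT_cons M (t c) x hlen, if_neg (by omega)]
      · rw [if_neg hcj]

-- item at (r, j) is the r-th cell of column j
theorem item_eq_colv (pb : List (List String)) (m : Int) (r j : ℕ) (hr : r < m.toNat) :
    PySem.List.pyGetD (PySem.List.pyGetD pb ((r : ℕ) : Int) []) ((j : ℕ) : Int) ""
    = (colv pb m (j : Int)).getD r "" := by
  unfold colv
  rw [PySem.List.pyRange_one, List.map_map]
  rw [PySem.List.getD_map_range _ _ _ _ (by simpa using hr)]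
  norm_num

theorem tailv_cons (pb : List (List String)) (m : Int) (j r : ℕ) (hr : r < m.toNat) :
    tailv pb m j r
    = (if ((colv pb m j).getD r "" == "#") = true then tailv pb m j (r + 1)
       else (colv pb m j).getD r "" :: tailv pb m j (r + 1)) := by
  unfold tailv
  have hlen : r < (colv pb m (j : Int)).length := by rw [length_colv]; exact hr
  rw [List.drop_eq_getElem_cons hlen, List.filter_cons, List.getD_eq_getElem _ _ hlen]
  by_cases hx : (colv pb m (j : Int))[r] = "#"
  · simp [hx]
  · have hb : ((colv pb m (j : Int))[r] != "#") = true := by simp [hx]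
    simp [hb, hx]

theorem tailv_top (pb : List (List String)) (m : Int) (c : ℕ) :
    tailv pb m c m.toNat = [] := by
  unfold tailv
  rw [List.drop_of_length_le (by rw [length_colv])]
  simp

-- one cell step of B's inner loop: column j of row r is consumed
theorem cell_step (pb : List (List String)) (m n : Int) (r : ℕ) (hr : r < m.toNat)
    (j : ℕ) (hj : j < n.toNat) (cnt : Int) :
    cellF pb ((r : ℕ) : Int)
      (gridOf m.toNat n.toNat (tmix pb m r j), writeOf m n.toNat (tmix pb m r j), cnt)
      ((j : ℕ) : Int)
    = (gridOf m.toNat n.toNat (tmix pb m r (j + 1)),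
       writeOf m n.toNat (tmix pb m r (j + 1)),
       cnt + hAt pb m r j) := by
  have htm : ∀ c, c ≠ j → tmix pb m r j c = tmix pb m r (j + 1) c := by
    intro c hc
    unfold tmix
    by_cases h1 : c < j
    · rw [if_pos h1, if_pos (by omega)]
    · rw [if_neg h1, if_neg (by omega)]
  have htj : tmix pb m r j j = tailv pb m j (r + 1) := by
    unfold tmix; rw [if_neg (by omega)]
  have htj' : tmix pb m r (j + 1) j = tailv pb m j r := by
    unfold tmix; rw [if_pos (by omega)]
  simp only [cellF]
  rw [item_eq_colv pb m r j hr]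
  by_cases hx : ((colv pb m (j : Int)).getD r "" == "#") = true
  · rw [if_pos hx]
    have heq : ∀ c, c < n.toNat → tmix pb m r j c = tmix pb m r (j + 1) c := by
      intro c _
      by_cases hcj : c = j
      · subst hcj
        rw [htj, htj', tailv_cons pb m c r hr, if_pos hx]
      · exact htm c hcj
    rw [gridOf_congr m.toNat n.toNat _ _ heq, writeOf_congr m n.toNat _ _ heq]
    unfold hAt
    rw [if_pos hx]
  · rw [if_neg hx]
    have hle : (tailv pb m j (r + 1)).length ≤ m.toNat - (r + 1) :=
      length_tailv_le pb m j (r + 1)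
    have hlt : (tmix pb m r j j).length < m.toNat := by rw [htj]; omega
    have hw : PySem.List.pyGetD (writeOf m n.toNat (tmix pb m r j)) ((j : ℕ) : Int) 0
        = m - 1 - ((tmix pb m r j j).length : Int) := by
      rw [PySem.List.pyGetD_natCast]
      unfold writeOf
      rw [PySem.List.getD_map_range _ _ _ _ hj]
    rw [hw]
    have hcast : m - 1 - ((tmix pb m r j j).length : Int)
        = ((m.toNat - 1 - (tmix pb m r j j).length : ℕ) : Int) := by omega
    rw [hcast]
    simp only [PySem.List.pySetD_natCast, PySem.List.pyGetD_natCast]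
    rw [grid_write m.toNat n.toNat (tmix pb m r j) j hj _ hlt]
    have hlenr : (tailv pb m j r).length = (tailv pb m j (r + 1)).length + 1 := by
      rw [tailv_cons pb m j r hr, if_neg hx]
      simp
    simp only [Prod.mk.injEq]
    refine ⟨?_, ?_, ?_⟩
    · apply gridOf_congr
      intro c _
      by_cases hcj : c = j
      · subst hcj
        rw [if_pos rfl, htj, htj', tailv_cons pb m c r hr, if_neg hx]
      · rw [if_neg hcj]
        exact htm c hcj
    · unfold writeOf
      rw [set_map_range]
      apply List.map_congr_left
      intro c _
      by_cases hcj : c = j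
      · subst hcj
        rw [if_pos rfl, htj', htj, hlenr]
        push_cast
        omega
      · rw [if_neg hcj, htm c hcj]
    · unfold hAt
      rw [if_neg hx]
      omega

-- B's inner loop over the columns of row r realises one full row step
theorem inner_fold (pb : List (List String)) (m n : Int) (r : ℕ) (hr : r < m.toNat)
    (cnt : Int) : ∀ (j : ℕ), j ≤ n.toNat →
    (List.range j).foldl (fun s (k : ℕ) => cellF pb ((r : ℕ) : Int) s ((0 : Int) + (k : Int)))
      (gridOf m.toNat n.toNat (tmix pb m r 0), writeOf m n.toNat (tmix pb m r 0), cnt)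
    = (gridOf m.toNat n.toNat (tmix pb m r j), writeOf m n.toNat (tmix pb m r j),
       cnt + ((List.range j).map (hAt pb m r)).sum) := by
  intro j
  induction j with
  | zero => intro _; simp
  | succ j ih =>
    intro hj1
    have hjN : j < n.toNat := by omega
    rw [List.range_succ, List.foldl_append, ih (by omega)]
    simp only [List.foldl_cons, List.foldl_nil, zero_add]
    rw [cell_step pb m n r hr j hjN _]
    simp only [Prod.mk.injEq]
    refine ⟨trivial, trivial, ?_⟩
    rw [List.map_append, List.sum_append]
    simp [add_assoc]

-- B's outer loop: processing rows r-1 … 0 takes BS r to BS 0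
theorem outer_fold (pb : List (List String)) (m n : Int) : ∀ (r : ℕ), r ≤ m.toNat →
    (PySem.List.pyRange ((r : Int) - 1) (-1) (-1)).foldl
      (fun (s : List (List String) × List Int × Int) row =>
        (PySem.List.pyRange 0 n 1).foldl (cellF pb row) s)
      (BS pb m n r)
    = BS pb m n 0 := by
  intro r
  induction r with
  | zero =>
    intro _
    rw [PySem.List.pyRange_neg_one_eq_nil (by omega)]
    rfl
  | succ r ih =>
    intro hr1
    have hrM : r < m.toNat := by omega
    have hc : ((r + 1 : ℕ) : Int) - 1 = ((r : ℕ) : Int) := by push_cast; ring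
    rw [hc, PySem.List.pyRange_neg_one_cons (by omega : (-1 : Int) < ((r : ℕ) : Int)),
      List.foldl_cons]
    have hstep : (PySem.List.pyRange 0 n 1).foldl (cellF pb ((r : ℕ) : Int)) (BS pb m n (r + 1))
        = BS pb m n r := by
      rw [PySem.List.pyRange_one, List.foldl_map]
      simp only [Int.sub_zero]
      have he : ∀ c, c < n.toNat → tailv pb m c (r + 1) = tmix pb m r 0 c := by
        intro c _
        unfold tmix
        rw [if_neg (by omega)]
      have hinit : BS pb m n (r + 1)
          = (gridOf m.toNat n.toNat (tmix pb m r 0), writeOf m n.toNat (tmix pb m r 0),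
             ((List.range n.toNat).map
               (fun c => (m.toNat : Int) - ((r + 1 : ℕ) : Int) - ((tailv pb m c (r + 1)).length : Int))).sum) := by
        unfold BS
        rw [gridOf_congr _ _ _ _ he, writeOf_congr _ _ _ _ he]
      rw [hinit, inner_fold pb m n r hrM _ n.toNat le_rfl]
      unfold BS
      simp only [Prod.mk.injEq]
      refine ⟨gridOf_congr _ _ _ _ ?_, writeOf_congr _ _ _ _ ?_, ?_⟩
      · intro c hc'
        unfold tmix
        rw [if_pos hc']
      · intro c hc'
        unfold tmix
        rw [if_pos hc']
      · rw [← PySem.List.sum_map_add_int]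
        apply congrArg List.sum
        apply List.map_congr_left
        intro c _
        by_cases hx : ((colv pb m (c : Int)).getD r "" == "#") = true
        · unfold hAt
          rw [if_pos hx, tailv_cons pb m c r hrM, if_pos hx]
          push_cast
          ring
        · unfold hAt
          rw [if_neg hx]
          have hlenr : (tailv pb m c r).length = (tailv pb m c (r + 1)).length + 1 := by
            rw [tailv_cons pb m c r hrM, if_neg hx]
            simp
          rw [hlenr]
          push_cast
          ring
    rw [hstep]
    exact ih (by omega)

-- B's initial state is the invariant state with no rows processed yet
theorem init_eq_BS (pb : List (List String)) (m n : Int) :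
    ((PySem.List.pyRange 0 m 1).map (fun _ => List.replicate n.toNat "0"),
     List.replicate n.toNat (m - 1), (0 : Int)) = BS pb m n m.toNat := by
  unfold BS
  simp only [Prod.mk.injEq]
  refine ⟨?_, ?_, ?_⟩
  · unfold gridOf
    rw [PySem.List.pyRange_one, List.map_map]
    simp only [Int.sub_zero]
    apply List.map_congr_left
    intro i hi
    have hiM : i < m.toNat := by simpa using hi
    symm
    apply List.ext_getElem
    · simp
    · intro c h1 h2
      simp only [List.getElem_map, List.getElem_range, Function.comp_apply,
        List.getElem_replicate]
      rw [tailv_top, getD_padT]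
      simp only [List.length_nil, Nat.sub_zero]
      rw [if_pos hiM]
  · unfold writeOf
    symm
    apply List.ext_getElem
    · simp
    · intro c h1 h2
      simp only [List.getElem_map, List.getElem_range, List.getElem_replicate]
      rw [tailv_top]
      simp
  · symm
    have hz : ∀ c ∈ List.range n.toNat,
        (m.toNat : Int) - (m.toNat : ℕ) - ((tailv pb m c m.toNat).length : Int) = (0 : Int) := by
      intro c _
      rw [tailv_top]
      simp
    rw [List.map_congr_left hz, PySem.List.sum_map_const_int]
    simp

-- A's transposed result is B's functional grid
theorem rowsOf_eq_gridOf (pb : List (List String)) (m n : Int) :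
    rowsOf m.toNat ((PySem.List.pyRange 0 n 1).map (newcol pb m))
    = gridOf m.toNat n.toNat (fun c => tailv pb m c 0) := by
  unfold rowsOf gridOf
  apply List.map_congr_left
  intro i _
  rw [PySem.List.pyRange_one, List.map_map, List.map_map]
  simp only [Int.sub_zero]
  apply List.map_congr_left
  intro c _
  simp only [Function.comp_apply, zero_add]
  unfold newcol padT tailv keptv
  rw [List.drop_zero]

-- A's count is B's count
theorem cnt_eq (pb : List (List String)) (m n : Int) :
    (0 : Int) + ((PySem.List.pyRange 0 n 1).map (hashc pb m)).sum
    = ((List.range n.toNat).map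
        (fun c => (m.toNat : Int) - (0 : ℕ) - ((tailv pb m c 0).length : Int))).sum := by
  rw [zero_add, PySem.List.pyRange_one, List.map_map]
  simp only [Int.sub_zero]
  apply congrArg List.sum
  apply List.map_congr_left
  intro c _
  simp only [Function.comp_apply, zero_add]
  unfold hashc tailv keptv
  rw [List.drop_zero, length_colv]
  push_cast
  ring

-- ===== VERDICT (by name: the statement is the Claim_ definition above) =====
theorem remove_items_spec : Claim_equal_remove_items := by
  intro pb m n hdom hpre
  unfold Spec_remove_items remove_items
  rw [mainfoldA pb m (PySem.List.pyRange 0 n 1) _ 0 (by simp [PySem.List.length_pyRange_one])]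
  have hconst : (PySem.List.pyRange 0 m 1).map (fun _ => ([] : List String))
      = List.replicate m.toNat ([] : List String) := by
    apply List.ext_getElem
    · simp [PySem.List.length_pyRange_one]
    · intro i h1 h2
      simp
  rw [hconst, ← List.foldl_map,
    foldZip_eq_rowsOf m.toNat _ (by
      intro c hc
      simp only [List.mem_map] at hc
      obtain ⟨d, hd, rfl⟩ := hc
      exact length_newcol pb m d)]
  have hrange : PySem.List.pyRange (m - 1) (-1) (-1)
      = PySem.List.pyRange ((m.toNat : Int) - 1) (-1) (-1) := by
    by_cases h : 0 ≤ m
    · have hm : (m.toNat : Int) = m := by omega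
      rw [hm]
    · rw [PySem.List.pyRange_neg_one_eq_nil (by omega),
        PySem.List.pyRange_neg_one_eq_nil (by omega)]
  have hB : remove_items_alt pb m n = ((BS pb m n 0).1, (BS pb m n 0).2.2) := by
    show (((PySem.List.pyRange (m - 1) (-1) (-1)).foldl
        (fun (s : List (List String) × List Int × Int) row =>
          (PySem.List.pyRange 0 n 1).foldl (cellF pb row) s)
        ((PySem.List.pyRange 0 m 1).map (fun _ => List.replicate n.toNat "0"),
         List.replicate n.toNat (m - 1), 0)).1,
      ((PySem.List.pyRange (m - 1) (-1) (-1)).foldl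
        (fun (s : List (List String) × List Int × Int) row =>
          (PySem.List.pyRange 0 n 1).foldl (cellF pb row) s)
        ((PySem.List.pyRange 0 m 1).map (fun _ => List.replicate n.toNat "0"),
         List.replicate n.toNat (m - 1), 0)).2.2) = _
    rw [init_eq_BS pb m n, hrange, outer_fold pb m n m.toNat le_rfl]
  rw [hB]
  unfold BS
  simp only [Prod.mk.injEq]
  exact ⟨rowsOf_eq_gridOf pb m n, cnt_eq pb m n⟩
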